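-- pv_equiv track=rewrite | github.com/mbido/advent-of-code | aoc_2024/src/day_22.py | next_secret
-- ===== SOURCE A (Python) =====
-- P = 16777216
--
-- N = 2000
--
-- def next_secret(secret):
--     digits = []
--     diffs = [-20]
--     for _ in range(N):
--         a = secret * 64
--         a ^= secret
--         a %= P
--
--         b = a // 32
--         b ^= a
--         b %= P
--
--         c = b * 2048
--         c ^= b
--         c %= P
--
--
--         secret = c
--         digits.append(secret % 10)
--         if len(digits) > 1:
--             diffs.append(digits[-1] - digits[-2])
--     return digits, diffs
-- ===== SOURCE B (Python) =====
-- P = 16777216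
--
-- N = 2000
--
-- BITS = 24
--
--
-- def _basis_image(x):
--     # image of one basis vector under the (F2-linear) xorshift update
--     x = (x ^ (x << 6)) & (P - 1)
--     x = x ^ (x >> 5)
--     x = (x ^ (x << 11)) & (P - 1)
--     return x
--
--
-- _COLS = [_basis_image(1 << j) for j in range(BITS)]
--
--
-- def next_secret(secret):
--     # the update is linear over GF(2), so each step is a matrix-vector
--     # product: XOR together the matrix columns picked by the state's bits
--     s = secret % P
--     digits = []
--     for _ in range(N):
--         t = 0
--         for j in range(BITS):
--             if (s >> j) & 1:
--                 t ^= _COLS[j]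
--         s = t
--         digits.append(s % 10)
--     diffs = [-20] + [y - x for x, y in zip(digits, digits[1:])]
--     return digits, diffs
-- ===== Notes on version B (the rewrite author's own statement) =====
-- stated objective: alternative
-- what changed: B exploits that the xorshift update is linear over GF(2): it precomputes the columns of the update's bit-matrix once (images of the basis vectors, written in shift/mask form) and performs each step as a matrix-vector product -- XORing together the columns selected by the set bits of the state -- instead of A's multiply/xor/divide/mod arithmetic; digits are collected per step and diffs are built afterwards as the sentinel followed by pairwise differences.
import Mathlib
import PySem

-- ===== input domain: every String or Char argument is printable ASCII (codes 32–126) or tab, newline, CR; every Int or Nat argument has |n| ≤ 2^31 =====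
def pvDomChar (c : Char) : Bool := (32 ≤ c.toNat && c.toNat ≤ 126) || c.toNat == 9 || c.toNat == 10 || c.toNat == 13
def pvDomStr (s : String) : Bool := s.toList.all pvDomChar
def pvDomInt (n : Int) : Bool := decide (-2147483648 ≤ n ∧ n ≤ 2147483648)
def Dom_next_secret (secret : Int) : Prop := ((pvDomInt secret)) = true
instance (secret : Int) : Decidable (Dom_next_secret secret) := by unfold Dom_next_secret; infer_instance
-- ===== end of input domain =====

-- B replaces A's per-step xorshift arithmetic by a different algorithm: the update is
-- linear over GF(2), so B precomputes the matrix columns of the update once and performs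
-- each step as a matrix–vector product (XOR of the columns selected by the state's bits).

-- ===== PORT A =====
-- the for-loop over range(N) with state (secret, digits, diffs), as fuel recursion
def pvLoopA : Nat → Int → List Int → List Int → List Int × List Int
  | 0, _, digits, diffs => (digits, diffs)
  | n+1, secret, digits, diffs =>
    let a := PySem.Int.mod (PySem.Int.bxor (secret * 64) secret) 16777216
    let b := PySem.Int.mod (PySem.Int.bxor (PySem.Int.floordiv a 32) a) 16777216
    let c := PySem.Int.mod (PySem.Int.bxor (b * 2048) b) 16777216
    let digits' := digits ++ [PySem.Int.mod c 10]
    let diffs' :=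
      if digits'.length > 1 then
        diffs ++ [PySem.List.pyGetD digits' (-1) 0 - PySem.List.pyGetD digits' (-2) 0]
      else diffs
    pvLoopA n c digits' diffs'

def next_secret (secret : Int) : List Int × List Int :=
  pvLoopA 2000 secret [] [-20]

-- ===== PORT B =====
-- _basis_image(x): image of one basis vector under the xorshift update (shift/mask form)
def pvBasisImage (x : Int) : Int :=
  let x1 := PySem.Int.band (PySem.Int.bxor x (x <<< 6)) (16777216 - 1)
  let x2 := PySem.Int.bxor x1 (x1 >>> 5)
  PySem.Int.band (PySem.Int.bxor x2 (x2 <<< 11)) (16777216 - 1)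

-- _COLS = [_basis_image(1 << j) for j in range(BITS)]  (j from range is ≥ 0, so .toNat is exact)
def pvCols : List Int :=
  (PySem.List.pyRange 0 24 1).map (fun j => pvBasisImage ((1 : Int) <<< j.toNat))

-- the inner 'for j in range(BITS): if (s >> j) & 1: t ^= _COLS[j]' loop (truthiness = ≠ 0)
def pvTblStep (s : Int) : Int :=
  (PySem.List.pyRange 0 24 1).foldl
    (fun t j =>
      if PySem.Int.band (s >>> j.toNat) 1 ≠ 0 then PySem.Int.bxor t (PySem.List.pyGetD pvCols j 0)
      else t) 0

-- the digit-generation loop of B (appends s % 10 after each table step)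
def pvDigitsB : Int → Nat → List Int
  | _, 0 => []
  | s, n+1 => let s' := pvTblStep s; PySem.Int.mod s' 10 :: pvDigitsB s' n

def next_secret_alt (secret : Int) : List Int × List Int :=
  let digits := pvDigitsB (PySem.Int.mod secret 16777216) 2000
  (digits, -20 :: List.zipWith (fun x y => y - x) digits digits.tail)

-- ===== PRECONDITION & SPEC =====
def Spec_next_secret (secret : Int) (out : List Int × List Int) : Prop := out = next_secret_alt secret
instance (secret : Int) (out : List Int × List Int) : Decidable (Spec_next_secret secret out) := by unfold Spec_next_secret; infer_instance

-- ===== CLAIM (what is proved, stated in full; the proofs are below) =====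
def Claim_equal_next_secret : Prop := ∀ (secret : Int), Dom_next_secret secret → Spec_next_secret secret (next_secret secret)

-- ===== LEMMAS AND PROOFS =====

-- ---- model of A's three-stage step (proof-side only) ----
def pvA (s : Int) : Int := PySem.Int.mod (PySem.Int.bxor (s * 64) s) 16777216

def pvStage23 (a : Int) : Int :=
  PySem.Int.mod (PySem.Int.bxor
    (PySem.Int.mod (PySem.Int.bxor (PySem.Int.floordiv a 32) a) 16777216 * 2048)
    (PySem.Int.mod (PySem.Int.bxor (PySem.Int.floordiv a 32) a) 16777216)) 16777216

def pvStepM (s : Int) : Int := pvStage23 (pvA s)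

-- A's digit stream
def pvDigits : Int → Nat → List Int
  | _, 0 => []
  | s, n+1 => let s' := pvStepM s; PySem.Int.mod s' 10 :: pvDigits s' n

-- pairwise differences of a digit list relative to a previous digit d
def pvDF (d : Int) : List Int → List Int
  | [] => []
  | x :: xs => (x - d) :: pvDF x xs

-- ---- Nat models of both step computations ----
def natStep (n : Nat) : Nat :=
  ((((n * 64 ^^^ n) % 16777216) / 32 ^^^ (n * 64 ^^^ n) % 16777216) % 16777216 * 2048
    ^^^ (((n * 64 ^^^ n) % 16777216) / 32 ^^^ (n * 64 ^^^ n) % 16777216) % 16777216) % 16777216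

def natSt1 (m : Nat) : Nat := (m ^^^ m <<< 6) &&& (16777216 - 1)
def natSt2 (a : Nat) : Nat := a ^^^ a >>> 5
def natSt3 (b : Nat) : Nat := (b ^^^ b <<< 11) &&& (16777216 - 1)
def natBI (m : Nat) : Nat := natSt3 (natSt2 (natSt1 m))

def natAux (k n : Nat) : Nat :=
  (List.range k).foldl (fun t j => if n.testBit j then t ^^^ natBI (2 ^ j) else t) 0

-- ---- generic bit lemmas ----
-- low bits of 2^k - 1 - x are the complement of x's low bits
theorem pv_testBit_compl (i : Nat) : ∀ (k x : Nat), x < 2 ^ k →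
    (2 ^ k - 1 - x).testBit i = (decide (i < k) && !x.testBit i) := by
  induction i with
  | zero =>
    intro k x hx
    cases k with
    | zero => interval_cases x; simp
    | succ k' =>
      have h2 : 2 ^ (k' + 1) = 2 * 2 ^ k' := by ring
      simp only [Nat.testBit_zero]
      have h3 : (2 ^ (k' + 1) - 1 - x) % 2 = 1 - x % 2 := by omega
      rcases Nat.mod_two_eq_zero_or_one x with h | h <;> simp [h3, h]
  | succ i ih =>
    intro k x hx
    cases k with
    | zero => interval_cases x; simp
    | succ k' =>
      have h2 : 2 ^ (k' + 1) = 2 * 2 ^ k' := by ring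
      have hq : x / 2 < 2 ^ k' := by omega
      have hdiv : (2 ^ (k' + 1) - 1 - x) / 2 = 2 ^ k' - 1 - x / 2 := by omega
      rw [Nat.testBit_succ, hdiv, ih k' (x / 2) hq, Nat.testBit_succ]
      have h4 : (i + 1 < k' + 1) = (i < k') := by simp
      simp [h4]

-- adding a fresh high bit is xor
theorem pv_two_pow_add_eq_xor (k r : Nat) (hr : r < 2 ^ k) : 2 ^ k + r = 2 ^ k ^^^ r := by
  apply Nat.eq_of_testBit_eq
  intro i
  have h1 : 2 ^ k + r = 2 ^ k * 1 + r := by ring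
  rw [h1, Nat.testBit_two_pow_mul_add 1 hr i, Nat.testBit_xor, Nat.testBit_two_pow]
  by_cases h : i < k
  · simp [h, Nat.ne_of_gt h]
  · have hik : k ≤ i := Nat.le_of_not_lt h
    have hrb : r.testBit i = false :=
      Nat.testBit_lt_two_pow (lt_of_lt_of_le hr (Nat.pow_le_pow_right (by norm_num) hik))
    rcases Nat.eq_or_lt_of_le hik with rfl | hlt
    · simp [hrb]
    · have h5 : (1 : Nat).testBit (i - k) = false := by
        apply Nat.testBit_lt_two_pow
        have h6 : 1 ≤ i - k := by omega
        calc (1 : Nat) < 2 ^ 1 := by norm_num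
        _ ≤ 2 ^ (i - k) := Nat.pow_le_pow_right (by norm_num) h6
      simp [h, hrb, h5, Nat.ne_of_lt hlt]

-- ---- the two Nat step models agree ----
theorem pv_natBI_eq_natStep (m : Nat) : natBI m = natStep m := by
  unfold natBI natSt1 natSt2 natSt3 natStep
  have hmask : ∀ y : Nat, y &&& (16777216 - 1) = y % 16777216 := by
    intro y
    have h24 : (16777216 : Nat) - 1 = 2 ^ 24 - 1 := by norm_num
    rw [h24, Nat.and_two_pow_sub_one_eq_mod]
  have hs6 : ∀ y : Nat, y <<< 6 = y * 64 := fun y => by rw [Nat.shiftLeft_eq]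
  have hs11 : ∀ y : Nat, y <<< 11 = y * 2048 := fun y => by rw [Nat.shiftLeft_eq]
  have hs5 : ∀ y : Nat, y >>> 5 = y / 32 := fun y => by rw [Nat.shiftRight_eq_div_pow]
  simp only [hmask, hs6, hs11, hs5]
  have hc1 : m ^^^ m * 64 = m * 64 ^^^ m := Nat.xor_comm _ _
  rw [hc1]
  set a := (m * 64 ^^^ m) % 16777216 with ha
  have hlt : a < 16777216 := Nat.mod_lt _ (by norm_num)
  have hx2 : a / 32 ^^^ a < 16777216 := by
    have h24 : (16777216 : Nat) = 2 ^ 24 := by norm_num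
    rw [h24] at hlt ⊢
    exact Nat.xor_lt_two_pow (lt_of_le_of_lt (Nat.div_le_self _ _) hlt) hlt
  rw [Nat.mod_eq_of_lt hx2, Nat.xor_comm a (a / 32),
    Nat.xor_comm (a / 32 ^^^ a) ((a / 32 ^^^ a) * 2048)]

-- ---- natBI is linear over GF(2) ----
theorem pv_natSt1_linear (x y : Nat) : natSt1 (x ^^^ y) = natSt1 x ^^^ natSt1 y := by
  unfold natSt1
  rw [Nat.shiftLeft_xor_distrib, ← Nat.and_xor_distrib_right]
  congr 1
  rw [Nat.xor_assoc, Nat.xor_assoc]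
  congr 1
  rw [← Nat.xor_assoc, ← Nat.xor_assoc, Nat.xor_comm y (x <<< 6)]

theorem pv_natSt2_linear (x y : Nat) : natSt2 (x ^^^ y) = natSt2 x ^^^ natSt2 y := by
  unfold natSt2
  rw [Nat.shiftRight_xor_distrib]
  rw [Nat.xor_assoc, Nat.xor_assoc]
  congr 1
  rw [← Nat.xor_assoc, ← Nat.xor_assoc, Nat.xor_comm y (x >>> 5)]

theorem pv_natSt3_linear (x y : Nat) : natSt3 (x ^^^ y) = natSt3 x ^^^ natSt3 y := by
  unfold natSt3
  rw [Nat.shiftLeft_xor_distrib, ← Nat.and_xor_distrib_right]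
  congr 1
  rw [Nat.xor_assoc, Nat.xor_assoc]
  congr 1
  rw [← Nat.xor_assoc, ← Nat.xor_assoc, Nat.xor_comm y (x <<< 11)]

theorem pv_natBI_linear (x y : Nat) : natBI (x ^^^ y) = natBI x ^^^ natBI y := by
  unfold natBI
  rw [pv_natSt1_linear, pv_natSt2_linear, pv_natSt3_linear]

-- ---- Nat-level table theorem ----
theorem pv_natAux_congr (k : Nat) (n m : Nat) (h : ∀ j, j < k → n.testBit j = m.testBit j) :
    natAux k n = natAux k m := by
  unfold natAux
  apply PySem.List.foldl_congr_mem
  intro acc x hx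
  rw [h x (List.mem_range.mp hx)]

theorem pv_testBit_high (k n : Nat) (hn : n < 2 ^ (k + 1)) :
    n.testBit k = decide (2 ^ k ≤ n) := by
  have h2 : 2 ^ (k + 1) = 2 * 2 ^ k := by ring
  have hp : 0 < 2 ^ k := Nat.two_pow_pos k
  simp only [Nat.testBit, Nat.shiftRight_eq_div_pow]
  by_cases h : 2 ^ k ≤ n
  · have h1 : n / 2 ^ k = 1 := Nat.div_eq_of_lt_le (by omega) (by omega)
    simp [h1, h]
  · have h0 : n / 2 ^ k = 0 := Nat.div_eq_of_lt (by omega)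
    simp [h0, h]

theorem pv_natAux_eq (k : Nat) : ∀ n : Nat, n < 2 ^ k → natAux k n = natBI n := by
  induction k with
  | zero =>
    intro n hn
    interval_cases n
    simp [natAux, natBI, natSt1, natSt2, natSt3]
  | succ k ih =>
    intro n hn
    have hsplit : natAux (k+1) n =
        if n.testBit k then natAux k n ^^^ natBI (2 ^ k) else natAux k n := by
      unfold natAux
      rw [List.range_succ, List.foldl_append]
      simp
    have hp : 0 < 2 ^ k := Nat.two_pow_pos k
    have hmodlt : n % 2 ^ k < 2 ^ k := Nat.mod_lt _ hp
    have hlow : natAux k n = natBI (n % 2 ^ k) := by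
      rw [pv_natAux_congr k n (n % 2 ^ k)
        (fun j hj => by rw [Nat.testBit_mod_two_pow]; simp [hj])]
      exact ih _ hmodlt
    rw [hsplit, pv_testBit_high k n hn]
    by_cases hb : 2 ^ k ≤ n
    · have h2 : 2 ^ (k + 1) = 2 * 2 ^ k := by ring
      have hmod : n % 2 ^ k = n - 2 ^ k := by
        rw [Nat.mod_eq_sub_mod hb, Nat.mod_eq_of_lt (by omega)]
      have hxor : n = 2 ^ k ^^^ n % 2 ^ k := by
        rw [← pv_two_pow_add_eq_xor k (n % 2 ^ k) hmodlt, hmod]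
        omega
      rw [if_pos (by simpa using hb), hlow]
      conv_rhs => rw [hxor]
      rw [pv_natBI_linear, Nat.xor_comm]
    · have hlt : n < 2 ^ k := by omega
      rw [if_neg (by simpa using hb), hlow, Nat.mod_eq_of_lt hlt]

-- ---- cast bridges ----
theorem pv_pvA_natCast (n : Nat) : pvA (n : Int) = (((n * 64 ^^^ n) % 16777216 : Nat) : Int) := by
  unfold pvA
  rw [show ((n : Int) * 64) = ((n * 64 : Nat) : Int) from by push_cast; ring,
    PySem.Int.bxor_natCast,
    show (16777216 : Int) = ((16777216 : Nat) : Int) from by norm_num,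
    PySem.Int.mod_natCast]


theorem pv_pvStepM_natCast (n : Nat) : pvStepM (n : Int) = ((natStep n : Nat) : Int) := by
  unfold pvStepM pvStage23 natStep
  rw [pv_pvA_natCast]
  rw [show (32 : Int) = ((32 : Nat) : Int) from by norm_num, PySem.Int.floordiv_natCast,
    PySem.Int.bxor_natCast,
    show (16777216 : Int) = ((16777216 : Nat) : Int) from by norm_num,
    PySem.Int.mod_natCast]
  set b := (((n * 64 ^^^ n) % 16777216) / 32 ^^^ (n * 64 ^^^ n) % 16777216) % 16777216 with hb
  rw [show ((b : Nat) : Int) * 2048 = ((b * 2048 : Nat) : Int) from by push_cast; ring,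
    PySem.Int.bxor_natCast, PySem.Int.mod_natCast]

theorem pv_pvBasisImage_natCast (m : Nat) : pvBasisImage (m : Int) = ((natBI m : Nat) : Int) := by
  simp only [pvBasisImage, natBI, natSt1, natSt2, natSt3]
  rw [show (6 : Int) = ((6 : Nat) : Int) from by norm_num, Int.shiftLeft_natCast,
    PySem.Int.bxor_natCast,
    show (16777216 - 1 : Int) = ((16777216 - 1 : Nat) : Int) from by norm_num,
    PySem.Int.band_natCast,
    show (5 : Int) = ((5 : Nat) : Int) from by norm_num, Int.shiftRight_natCast,
    PySem.Int.bxor_natCast,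
    show (11 : Int) = ((11 : Nat) : Int) from by norm_num, Int.shiftLeft_natCast,
    PySem.Int.bxor_natCast, PySem.Int.band_natCast]

theorem pv_foldl_cast (p : Nat → Bool) (g : Nat → Nat) (l : List Nat) (a : Nat) :
    l.foldl (fun t j => if p j then PySem.Int.bxor t ((g j : Nat) : Int) else t) ((a : Nat) : Int)
      = ((l.foldl (fun t j => if p j then t ^^^ g j else t) a : Nat) : Int) := by
  induction l generalizing a with
  | nil => rfl
  | cons x xs ih =>
    simp only [List.foldl_cons]
    by_cases h : p x
    · rw [if_pos h, if_pos h, PySem.Int.bxor_natCast, ih]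
    · rw [if_neg h, if_neg h, ih]

theorem pv_pvTblStep_natCast (n : Nat) : pvTblStep (n : Int) = ((natAux 24 n : Nat) : Int) := by
  unfold pvTblStep natAux
  rw [show (24 : Int) = ((24 : Nat) : Int) from by norm_num, PySem.List.pyRange_zero_natCast,
    List.foldl_map]
  have h1 : (List.range 24).foldl
      (fun (t : Int) (k : Nat) =>
        if n.testBit k then PySem.Int.bxor t ((natBI (2 ^ k) : Nat) : Int) else t) (((0 : Nat)) : Int)
      = ((List.foldl (fun t j => if n.testBit j then t ^^^ natBI (2 ^ j) else t) 0 (List.range 24) : Nat) : Int) :=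
    pv_foldl_cast (fun k => n.testBit k) (fun k => natBI (2 ^ k)) (List.range 24) 0
  rw [← h1]
  apply PySem.List.foldl_congr_mem
  intro acc k hk
  have hk24 : k < 24 := List.mem_range.mp hk
  have hband : PySem.Int.band ((n >>> k : Nat) : Int) 1 = ((n >>> k &&& 1 : Nat) : Int) := by
    rw [show (1 : Int) = ((1 : Nat) : Int) from rfl, PySem.Int.band_natCast]
  have hget : PySem.List.pyGetD pvCols ((k : Nat) : Int) 0 = ((natBI (2 ^ k) : Nat) : Int) := by
    unfold pvCols
    rw [show (24 : Int) = ((24 : Nat) : Int) from by norm_num,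
      PySem.List.pyGetD_map_pyRange _ 24 k 0 hk24]
    simp only [Int.toNat_natCast]
    rw [show (1 : Int) = ((1 : Nat) : Int) from rfl, Int.shiftLeft_natCast,
      show (1 <<< k : Nat) = 2 ^ k from by rw [Nat.shiftLeft_eq]; ring,
      pv_pvBasisImage_natCast]
  have hc : (¬((n >>> k &&& 1 : Nat) = 0)) ↔ (n.testBit k = true) := by simp [Nat.testBit]
  simp only [Int.toNat_natCast, Int.shiftRight_natCast, hband, ne_eq, Nat.cast_eq_zero, hget, hc]

-- ---- A's first stage depends only on secret mod 2^24 ----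
theorem pv_stage1_mod_nat (n : Nat) :
    (n * 64 ^^^ n) % 16777216 = ((n % 16777216) * 64 ^^^ n % 16777216) % 16777216 := by
  have h24 : (16777216 : Nat) = 2 ^ 24 := by norm_num
  have hs6 : ∀ y : Nat, y * 64 = y <<< 6 := fun y => by rw [Nat.shiftLeft_eq]
  rw [h24, hs6, hs6]
  apply Nat.eq_of_testBit_eq
  intro i
  simp only [Nat.testBit_mod_two_pow, Nat.testBit_xor, Nat.testBit_shiftLeft]
  by_cases h : i < 24
  · by_cases h6 : 6 ≤ i
    · have h7 : i - 6 < 24 := by omega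
      simp [h, h6, h7]
    · simp [h, h6]
  · simp [h]

set_option maxRecDepth 8192 in
theorem pv_pvA_mod (s : Int) : pvA s = pvA (PySem.Int.mod s 16777216) := by
  cases s with
  | ofNat n =>
    rw [show (Int.ofNat n) = ((n : Nat) : Int) from rfl,
      show (16777216 : Int) = ((16777216 : Nat) : Int) from by norm_num,
      PySem.Int.mod_natCast, pv_pvA_natCast, pv_pvA_natCast]
    rw [pv_stage1_mod_nat n]
  | negSucc m =>
    have hmul : Int.negSucc m * 64 = Int.negSucc (64 * m + 63) := by
      rw [Int.negSucc_eq, Int.negSucc_eq]; push_cast; ring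
    have hxor : PySem.Int.bxor (Int.negSucc m * 64) (Int.negSucc m)
        = (((64 * m + 63) ^^^ m : Nat) : Int) := by
      rw [hmul]; simp [PySem.Int.bxor]; omega
    have hu : m % 16777216 ≤ 16777215 := by
      have := Nat.mod_lt m (show 0 < 16777216 by norm_num); omega
    have hmod : PySem.Int.mod (Int.negSucc m) 16777216
        = ((16777215 - m % 16777216 : Nat) : Int) := by
      rw [PySem.Int.mod_eq_emod_of_pos (by norm_num), Int.negSucc_eq]
      have hcast : ((m : Int) % 16777216) = ((m % 16777216 : Nat) : Int) := by push_cast; rfl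
      omega
    rw [hmod, pv_pvA_natCast]
    unfold pvA
    rw [hxor, show (16777216 : Int) = ((16777216 : Nat) : Int) from by norm_num,
      PySem.Int.mod_natCast]
    refine congrArg (fun z : Nat => (z : Int)) ?_
    -- Nat goal: ((64m+63) ^^^ m) % 2^24 = (u*64 ^^^ u) % 2^24, u = 2^24-1 - m % 2^24
    set u := 16777215 - m % 16777216 with hudef
    have h24 : (16777216 : Nat) = 2 ^ 24 := by norm_num
    have hu24 : u = 2 ^ 24 - 1 - m % 2 ^ 24 := by rw [hudef, h24]; norm_num
    have hulow : m % 2 ^ 24 < 2 ^ 24 := Nat.mod_lt _ (by norm_num)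
    apply Nat.eq_of_testBit_eq
    intro i
    have hL : 64 * m + 63 = 2 ^ 6 * m + 63 := by norm_num
    have hR : u * 64 = 2 ^ 6 * u + 0 := by ring
    rw [h24]
    simp only [Nat.testBit_mod_two_pow, Nat.testBit_xor]
    rw [hL, Nat.testBit_two_pow_mul_add m (by norm_num : (63:Nat) < 2 ^ 6) i,
      hR, Nat.testBit_two_pow_mul_add u (by norm_num : (0:Nat) < 2 ^ 6) i]
    have hub : ∀ j : Nat, u.testBit j = (decide (j < 24) && !(m % 2 ^ 24).testBit j) := by
      intro j; rw [hu24]; exact pv_testBit_compl j 24 (m % 2 ^ 24) hulow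
    have hmb : ∀ j : Nat, (m % 16777216).testBit j = (decide (j < 24) && m.testBit j) := by
      intro j
      rw [show (16777216 : Nat) = 2 ^ 24 from by norm_num, Nat.testBit_mod_two_pow]
    by_cases h : i < 24
    · by_cases h6 : i < 6
      · have h63 : (63 : Nat).testBit i = true := by
          rw [show (63 : Nat) = 2 ^ 6 - 1 from by norm_num, Nat.testBit_two_pow_sub_one]
          simp [h6]
        simp [h, h6, h63, hub, hmb]
      · have h7 : i - 6 < 24 := by omega
        simp [h, h6, hub, h7, hmb]
    · simp [h]

theorem pv_pvStepM_mod (s : Int) : pvStepM s = pvStepM (PySem.Int.mod s 16777216) := by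
  unfold pvStepM
  rw [pv_pvA_mod s]

-- ---- main step equality ----
theorem pv_step_eq (s : Int) : pvTblStep (PySem.Int.mod s 16777216) = pvStepM s := by
  have hpos : (0 : Int) < 16777216 := by norm_num
  have hnn : 0 ≤ PySem.Int.mod s 16777216 := PySem.Int.mod_nonneg s hpos
  have hlt : PySem.Int.mod s 16777216 < 16777216 := PySem.Int.mod_lt s hpos
  obtain ⟨u, hu⟩ : ∃ u : Nat, PySem.Int.mod s 16777216 = (u : Int) :=
    ⟨(PySem.Int.mod s 16777216).toNat, by omega⟩
  have hult : u < 16777216 := by omega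
  rw [pv_pvStepM_mod s, hu, pv_pvTblStep_natCast, pv_pvStepM_natCast]
  congr 1
  rw [pv_natAux_eq 24 u (by norm_num; omega), pv_natBI_eq_natStep]

-- ---- stream equality ----
theorem pv_pvStepM_range (s : Int) : 0 ≤ pvStepM s ∧ pvStepM s < 16777216 := by
  unfold pvStepM pvStage23
  exact ⟨PySem.Int.mod_nonneg _ (by norm_num), PySem.Int.mod_lt _ (by norm_num)⟩

theorem pv_mod_self_of_range (t : Int) (h0 : 0 ≤ t) (h1 : t < 16777216) :
    PySem.Int.mod t 16777216 = t := by
  rw [PySem.Int.mod_eq_emod_of_pos (by norm_num)]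
  omega

theorem pv_digits_eq (n : Nat) : ∀ s : Int, pvDigitsB (PySem.Int.mod s 16777216) n = pvDigits s n := by
  induction n with
  | zero => intro s; rfl
  | succ n ih =>
    intro s
    show (PySem.Int.mod (pvTblStep (PySem.Int.mod s 16777216)) 10)
        :: pvDigitsB (pvTblStep (PySem.Int.mod s 16777216)) n
      = (PySem.Int.mod (pvStepM s) 10) :: pvDigits (pvStepM s) n
    rw [pv_step_eq s]
    congr 1
    have hrange := pv_pvStepM_range s
    have h := ih (pvStepM s)
    rwa [pv_mod_self_of_range (pvStepM s) hrange.1 hrange.2] at h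

-- ---- diffs machinery (A-side) ----
theorem pvZipWith_eq_pvDF (d : Int) (l : List Int) :
    List.zipWith (fun x y => y - x) (d :: l) l = pvDF d l := by
  induction l generalizing d with
  | nil => rfl
  | cons x xs ih => simp [pvDF, List.zipWith, ih]

theorem pvLoopA_succ (n : Nat) (s : Int) (digits diffs : List Int) :
    pvLoopA (n+1) s digits diffs =
      pvLoopA n (pvStepM s) (digits ++ [PySem.Int.mod (pvStepM s) 10])
        (if (digits ++ [PySem.Int.mod (pvStepM s) 10]).length > 1 then
          diffs ++ [PySem.List.pyGetD (digits ++ [PySem.Int.mod (pvStepM s) 10]) (-1) 0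
            - PySem.List.pyGetD (digits ++ [PySem.Int.mod (pvStepM s) 10]) (-2) 0]
        else diffs) := rfl

theorem pvLoopA_inv (n : Nat) :
    ∀ (s : Int) (ds : List Int) (d : Int) (fs : List Int),
      pvLoopA n s (ds ++ [d]) fs =
        (ds ++ [d] ++ pvDigits s n, fs ++ pvDF d (pvDigits s n)) := by
  induction n with
  | zero => intro s ds d fs; simp [pvLoopA, pvDigits, pvDF]
  | succ n ih =>
    intro s ds d fs
    have hlen : ((ds ++ [d]) ++ [PySem.Int.mod (pvStepM s) 10]).length > 1 := by
      simp
    have h1 : PySem.List.pyGetD ((ds ++ [d]) ++ [PySem.Int.mod (pvStepM s) 10]) (-1) 0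
        = PySem.Int.mod (pvStepM s) 10 :=
      PySem.List.pyGetD_neg_one_append_singleton _ _ _
    have h2 : PySem.List.pyGetD ((ds ++ [d]) ++ [PySem.Int.mod (pvStepM s) 10]) (-2) 0 = d := by
      rw [PySem.List.pyGetD_neg_ofNat _ 2 0 (by omega) (by simp)]
      simp
    rw [pvLoopA_succ, if_pos hlen, h1, h2, ih (pvStepM s) (ds ++ [d]) (PySem.Int.mod (pvStepM s) 10)
      (fs ++ [PySem.Int.mod (pvStepM s) 10 - d])]
    simp [pvDigits, pvDF]

-- ===== VERDICT (by name: the statement is the Claim_ definition above) =====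
theorem next_secret_spec : Claim_equal_next_secret := by
  intro secret _
  unfold Spec_next_secret next_secret next_secret_alt
  rw [show (2000 : Nat) = 1999 + 1 from rfl, pvLoopA_succ]
  rw [if_neg (by simp)]
  simp only [List.nil_append]
  have h := pvLoopA_inv 1999 (pvStepM secret) [] (PySem.Int.mod (pvStepM secret) 10) [-20]
  simp only [List.nil_append] at h
  rw [h]
  rw [pv_digits_eq 2000 secret]
  rw [show pvDigits secret (1999 + 1)
      = PySem.Int.mod (pvStepM secret) 10 :: pvDigits (pvStepM secret) 1999 from rfl]
  simp [pvZipWith_eq_pvDF]
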